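-- pv_equiv track=rewrite | github.com/volf52/aoc24 | py/src/aoc24/day9.py | simple_compact
-- ===== SOURCE A (Python) =====
-- SimpleMemory = list[int | None]
--
-- def simple_compact(memory: SimpleMemory) -> SimpleMemory:
--     mem: SimpleMemory = memory[:]
--
--     free_slot = mem.index(None)
--     to_move_idx = len(mem) - 1
--
--     while to_move_idx > free_slot and mem[to_move_idx] is None:
--         to_move_idx -= 1
--
--     while free_slot < to_move_idx:
--         mem[free_slot] = mem[to_move_idx]
--         mem[to_move_idx] = None
--
--         while free_slot < to_move_idx and mem[free_slot] is not None:
--             free_slot += 1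
--
--         while to_move_idx > free_slot and mem[to_move_idx] is None:
--             to_move_idx -= 1
--
--     return mem
-- ===== SOURCE B (Python) =====
-- def simple_compact(memory):
--     n = len(memory)
--     k = sum(1 for x in memory if x is not None)
--     filler = iter([x for x in reversed(memory) if x is not None])
--     out = [x if x is not None else next(filler) for x in memory[:k]]
--     return out + [None] * (n - k)
-- ===== Notes on version B (the rewrite author's own statement) =====
-- stated objective: alternative
-- what changed: Replaces A's in-place converging two-pointer swap loop with a non-mutating single forward fill: count the non-None blocks k, collect the non-None values from the back once, then fill the first k cells left to right (gaps take the next back value) and pad with None.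
-- crash fix: On lists containing no None, A raises ValueError (from mem.index(None)); B returns the list unchanged (already compact). — e.g. on simple_compact([some 1, some 2]): A raises ValueError, B returns [some 1, some 2]
import Mathlib
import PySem

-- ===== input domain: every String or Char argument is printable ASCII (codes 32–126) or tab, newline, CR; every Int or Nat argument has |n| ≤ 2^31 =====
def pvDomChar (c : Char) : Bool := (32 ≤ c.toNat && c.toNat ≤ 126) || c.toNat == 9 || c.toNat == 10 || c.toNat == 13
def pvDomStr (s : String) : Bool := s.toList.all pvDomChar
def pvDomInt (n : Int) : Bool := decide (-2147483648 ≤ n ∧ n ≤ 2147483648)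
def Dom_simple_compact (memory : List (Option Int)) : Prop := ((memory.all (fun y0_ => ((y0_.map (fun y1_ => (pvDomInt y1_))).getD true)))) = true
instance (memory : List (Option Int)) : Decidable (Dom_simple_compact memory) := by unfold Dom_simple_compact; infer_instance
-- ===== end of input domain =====

-- B replaces A's in-place converging two-pointer swaps with a non-mutating count + single
-- forward fill from a list of back values (alternative decomposition, same O(n) cost);
-- where A raises ValueError (no None present) B returns the list unchanged.

-- ===== PORT A =====
-- inner while: 'while free_slot < to_move_idx and mem[free_slot] is not None: free_slot += 1'
-- (indices are Nats that Python keeps in range; List.getD is exact here, = PySem.List.pyGetD via pyGetD_natCast)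
def aAdvF (mem : List (Option Int)) (f t : Nat) : Nat :=
  if _h : f < t ∧ mem.getD f none ≠ none then aAdvF mem (f + 1) t else f
termination_by t - f
decreasing_by omega

-- inner while: 'while to_move_idx > free_slot and mem[to_move_idx] is None: to_move_idx -= 1'
def aAdvT (mem : List (Option Int)) (f t : Nat) : Nat :=
  if _h : f < t ∧ mem.getD t none = none then aAdvT mem f (t - 1) else t
termination_by t - f
decreasing_by omega

-- outer while: fuel only makes the recursion structural; free_slot strictly increases each
-- pass, so memory.length + 1 passes always suffice (proved in the lemmas below)
def aMain (mem : List (Option Int)) (f t : Nat) : Nat → List (Option Int)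
  | 0 => mem
  | fuel + 1 =>
    if f < t then
      let mem1 := (mem.set f (mem.getD t none)).set t none
      let f1 := aAdvF mem1 f t
      aMain mem1 f1 (aAdvT mem1 f1 t) fuel
    else mem

def simple_compact (memory : List (Option Int)) : List (Option Int) :=
  match PySem.List.index? memory none with
  | none => memory  -- Python raises ValueError here (mem.index(None)); excluded by Pre_
  | some f => aMain memory f (aAdvT memory f (memory.length - 1)) (memory.length + 1)

-- ===== PORT B =====
-- the comprehension with 'next(filler)': each None consumes the next filler value
-- (the iterator is never exhausted: gaps in memory[:k] ≤ k = len(filler))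
def bFill : List (Option Int) → List (Option Int) → List (Option Int)
  | [], _ => []
  | some v :: r, fs => some v :: bFill r fs
  | none :: r, fs => fs.headD none :: bFill r fs.tail

def simple_compact_alt (memory : List (Option Int)) : List (Option Int) :=
  let n := memory.length
  let k := memory.countP (fun x => x.isSome)          -- sum(1 for x in memory if x is not None)
  let filler := memory.reverse.filter (fun x => x.isSome)
  bFill (memory.take k) filler ++ List.replicate (n - k) none

-- ===== PRECONDITION & SPEC =====
-- Pre_ excludes exactly the lists with no None, on which A's mem.index(None) raises ValueError
def Pre_simple_compact (memory : List (Option Int)) : Prop := none ∈ memory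
instance (memory : List (Option Int)) : Decidable (Pre_simple_compact memory) := by
  unfold Pre_simple_compact; infer_instance

def pvWitness_simple_compact : List (Option Int) := [some 1, none, some 2]

-- On lists containing no None, A raises ValueError (mem.index(None)); B returns the list unchanged.
def Raises_simple_compact (memory : List (Option Int)) : Prop := none ∉ memory
instance (memory : List (Option Int)) : Decidable (Raises_simple_compact memory) := by
  unfold Raises_simple_compact; infer_instance

def pvRaiseWitness_simple_compact : List (Option Int) := [some 1, some 2]
def pvRaiseWitnessOut_simple_compact : List (Option Int) := [some 1, some 2]

def Spec_simple_compact (memory : List (Option Int)) (out : List (Option Int)) : Prop :=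
  out = simple_compact_alt memory
instance (memory : List (Option Int)) (out : List (Option Int)) : Decidable (Spec_simple_compact memory out) := by
  unfold Spec_simple_compact; infer_instance

-- ===== CLAIM (what is proved, stated in full; the proofs are below) =====
def Claim_equal_simple_compact : Prop := ∀ (memory : List (Option Int)), Dom_simple_compact memory → Pre_simple_compact memory → Spec_simple_compact memory (simple_compact memory)

def Claim_raises_simple_compact : Prop := (∀ (memory : List (Option Int)), Dom_simple_compact memory → Raises_simple_compact memory → ¬ Pre_simple_compact memory) ∧ (Dom_simple_compact (pvRaiseWitness_simple_compact) ∧ Raises_simple_compact (pvRaiseWitness_simple_compact) ∧ simple_compact_alt (pvRaiseWitness_simple_compact) = pvRaiseWitnessOut_simple_compact)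

-- ===== LEMMAS AND PROOFS =====


-- helper: getD through an append, left part
theorem pv_getD_append_left {l r : List (Option Int)} {i : Nat} (h : i < l.length) (d : Option Int) :
    (l ++ r).getD i d = l.getD i d := by
  simp [List.getD_eq_getElem?_getD, List.getElem?_append_left h]

-- helper: getD at the junction (index = left length)
theorem pv_getD_append_len (l : List (Option Int)) (a : Option Int) (r : List (Option Int)) (d : Option Int) :
    (l ++ a :: r).getD l.length d = a := by
  simp [List.getD_eq_getElem?_getD]

-- helper: set at the junction
theorem pv_set_append_len (l : List (Option Int)) (a x : Option Int) (r : List (Option Int)) :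
    (l ++ a :: r).set l.length x = l ++ x :: r := by
  induction l with
  | nil => simp
  | cons h t ih => simp [ih]

-- helper: getD of an all-none list is none
theorem pv_getD_all_none {r : List (Option Int)} (h : ∀ y ∈ r, y = none) (j : Nat) :
    r.getD j none = none := by
  rcases Nat.lt_or_ge j r.length with hj | hj
  · simpa [List.getD_eq_getElem?_getD, List.getElem?_eq_getElem hj] using h r[j] (List.getElem_mem hj)
  · simp [List.getD_eq_getElem?_getD, List.getElem?_eq_none hj]

-- helper: getD beyond the junction of l ++ none :: r with all-none r
theorem pv_getD_tail_none {l r : List (Option Int)} (hr : ∀ y ∈ r, y = none) {i : Nat}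
    (h : l.length ≤ i) : (l ++ none :: r).getD i none = none := by
  rcases Nat.eq_or_lt_of_le h with rfl | h
  · exact pv_getD_append_len l none r none
  · have : (l ++ none :: r).getD i none = (none :: r).getD (i - l.length) none := by
      simp [List.getD_eq_getElem?_getD, List.getElem?_append_right (Nat.le_of_lt h)]
    rw [this]
    rcases Nat.exists_eq_add_of_lt h with ⟨j, hj⟩
    have : i - l.length = j + 1 := by omega
    rw [this]
    simpa using pv_getD_all_none hr j

-- spec of the free_slot-advancing inner while
theorem aAdvF_spec (mem : List (Option Int)) (f t : Nat) (h : f ≤ t) :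
    f ≤ aAdvF mem f t ∧ aAdvF mem f t ≤ t ∧
    (∀ i, f ≤ i → i < aAdvF mem f t → mem.getD i none ≠ none) ∧
    (aAdvF mem f t = t ∨ mem.getD (aAdvF mem f t) none = none) := by
  fun_induction aAdvF mem f t with
  | case1 f hc ih =>
    obtain ⟨h1, h2, h3, h4⟩ := ih hc.1
    refine ⟨by omega, h2, ?_, h4⟩
    intro i hfi hi
    rcases Nat.eq_or_lt_of_le hfi with rfl | hlt
    · exact hc.2
    · exact h3 i hlt hi
  | case2 f hc =>
    rw [Decidable.not_and_iff_not_or_not] at hc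
    refine ⟨le_refl f, h, by omega, ?_⟩
    rcases hc with hc | hc
    · left; omega
    · right; simpa using hc

-- spec of the to_move_idx-advancing inner while
theorem aAdvT_spec (mem : List (Option Int)) (f t : Nat) (h : f ≤ t) :
    f ≤ aAdvT mem f t ∧ aAdvT mem f t ≤ t ∧
    (∀ i, aAdvT mem f t < i → i ≤ t → mem.getD i none = none) ∧
    (aAdvT mem f t = f ∨ mem.getD (aAdvT mem f t) none ≠ none) := by
  fun_induction aAdvT mem f t with
  | case1 t hc ih =>
    obtain ⟨h1, h2, h3, h4⟩ := ih (by omega)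
    refine ⟨h1, by omega, ?_, h4⟩
    intro i hi hit
    rcases Nat.eq_or_lt_of_le hit with rfl | hlt
    · exact hc.2
    · exact h3 i hi (by omega)
  | case2 t hc =>
    rw [Decidable.not_and_iff_not_or_not] at hc
    refine ⟨h, le_refl t, by omega, ?_⟩
    rcases hc with hc | hc
    · left; omega
    · right; exact hc

-- the loop invariant of A's outer while (at the loop head)
def pvInv (mem : List (Option Int)) (f t : Nat) : Prop :=
  f ≤ t ∧ t < mem.length ∧
  (∀ i, i < f → mem.getD i none ≠ none) ∧
  (∀ i, t < i → mem.getD i none = none) ∧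
  (f < t → mem.getD f none = none ∧ mem.getD t none ≠ none)

-- bFill leaves an all-some list unchanged and passes an all-some prefix through
theorem bFill_all_some {xs : List (Option Int)} (h : ∀ y ∈ xs, y.isSome) (fs : List (Option Int)) :
    bFill xs fs = xs := by
  induction xs generalizing fs with
  | nil => rfl
  | cons x r ih =>
    match x, h x List.mem_cons_self with
    | some v, _ => simp [bFill, ih (fun y hy => h y (List.mem_cons_of_mem _ hy)) fs]

theorem bFill_append_some {P : List (Option Int)} (h : ∀ y ∈ P, y.isSome)
    (xs fs : List (Option Int)) : bFill (P ++ xs) fs = P ++ bFill xs fs := by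
  induction P with
  | nil => rfl
  | cons x r ih =>
    match x, h x List.mem_cons_self with
    | some v, _ =>
      simp only [List.cons_append, bFill, ih (fun y hy => h y (List.mem_cons_of_mem _ hy))]

-- bFill only inspects as many filler entries as xs has gaps
theorem bFill_congr (xs : List (Option Int)) (fs ys zs : List (Option Int))
    (h : xs.countP (fun x => x.isNone) ≤ fs.length) :
    bFill xs (fs ++ ys) = bFill xs (fs ++ zs) := by
  induction xs generalizing fs with
  | nil => rfl
  | cons x r ih =>
    cases x with
    | some v =>
      have h' : r.countP (fun x => x.isNone) ≤ fs.length := by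
        simpa using h
      simp [bFill, ih fs h']
    | none =>
      have h1 : 1 ≤ fs.length := by
        have := h; simp at this; omega
      match fs, h1 with
      | g :: fs', _ =>
        have h' : r.countP (fun x => x.isNone) ≤ fs'.length := by
          simp at h; omega
        simp [bFill, ih fs' h']

-- B is a fixed point on an already-compacted list
theorem alt_sorted (P : List (Option Int)) (x : Option Int) (R : List (Option Int))
    (hP : ∀ y ∈ P, y.isSome) (hR : ∀ y ∈ R, y = none) :
    simple_compact_alt (P ++ x :: R) = P ++ x :: R := by
  have hcp : P.countP (fun x => x.isSome) = P.length := List.countP_eq_length.mpr (fun a ha => hP a ha)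
  have hcr : R.countP (fun x => x.isSome) = 0 := by
    apply List.countP_eq_zero.mpr
    intro a ha; rw [hR a ha]; simp
  have hRrep : R = List.replicate R.length none := List.eq_replicate_of_mem hR
  cases x with
  | some v =>
    have hk : (P ++ some v :: R).countP (fun x => x.isSome) = P.length + 1 := by
      simp [List.countP_append, hcp, hcr]
    have htake : (P ++ some v :: R).take (P.length + 1) = P ++ [some v] := by
      rw [List.take_append]
      simp
    have hfill : bFill (P ++ [some v]) ((P ++ some v :: R).reverse.filter (fun x => x.isSome)) = P ++ [some v] := by
      apply bFill_all_some
      intro y hy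
      rcases List.mem_append.mp hy with h | h
      · exact hP y h
      · simp at h; simp [h]
    simp only [simple_compact_alt, hk, htake, hfill]
    have : (P ++ some v :: R).length - (P.length + 1) = R.length := by simp only [List.length_append, List.length_cons]; omega
    rw [this, List.append_assoc]
    congr 1
    simp [← hRrep]
  | none =>
    have hk : (P ++ none :: R).countP (fun x => x.isSome) = P.length := by
      simp [List.countP_append, hcp, hcr]
    have htake : (P ++ none :: R).take P.length = P := by
      rw [List.take_append]
      simp
    simp only [simple_compact_alt, hk, htake, bFill_all_some hP]
    have : (P ++ none :: R).length - P.length = R.length + 1 := by simp only [List.length_append, List.length_cons]; omega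
    rw [this, List.replicate_succ]
    congr 2
    simp [← hRrep]

-- B's value is invariant under one swap of A's outer loop
theorem alt_swap (P M R : List (Option Int)) (v : Int)
    (hP : ∀ y ∈ P, y.isSome) (hR : ∀ y ∈ R, y = none) :
    simple_compact_alt (P ++ some v :: M ++ none :: R) =
    simple_compact_alt (P ++ none :: M ++ some v :: R) := by
  set cM := M.countP (fun x => x.isSome) with hcM
  have hcp : P.countP (fun x => x.isSome) = P.length := List.countP_eq_length.mpr (fun a ha => hP a ha)
  have hcr : R.countP (fun x => x.isSome) = 0 := by
    apply List.countP_eq_zero.mpr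
    intro a ha; rw [hR a ha]; simp
  have hfr : R.reverse.filter (fun x => x.isSome) = [] := by
    apply List.filter_eq_nil_iff.mpr
    intro a ha; rw [hR a (List.mem_reverse.mp ha)]; simp
  have hfp : P.reverse.filter (fun x => x.isSome) = P.reverse := by
    apply List.filter_eq_self.mpr
    intro a ha; exact hP a (List.mem_reverse.mp ha)
  have hcMle : cM ≤ M.length := List.countP_le_length
  have hkL : (P ++ some v :: M ++ none :: R).countP (fun x => x.isSome) = P.length + (1 + cM) := by
    simp [List.countP_append, hcp, hcr, ← hcM]; omega
  have hkR : (P ++ none :: M ++ some v :: R).countP (fun x => x.isSome) = P.length + (1 + cM) := by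
    simp [List.countP_append, hcp, hcr, ← hcM]; omega
  have h0 : P.length + (1 + cM) - (P.length + (M.length + 1)) = 0 := by omega
  have htakeL : (P ++ some v :: M ++ none :: R).take (P.length + (1 + cM)) = P ++ some v :: M.take cM := by
    rw [List.take_append]
    simp [List.take_cons, List.take_append, h0, List.take_of_length_le (show P.length ≤ P.length + (1 + cM) by omega)]
  have htakeR : (P ++ none :: M ++ some v :: R).take (P.length + (1 + cM)) = P ++ none :: M.take cM := by
    rw [List.take_append]
    simp [List.take_cons, List.take_append, h0, List.take_of_length_le (show P.length ≤ P.length + (1 + cM) by omega)]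
  set Mf := M.reverse.filter (fun x => x.isSome) with hMf
  have hfillL : (P ++ some v :: M ++ none :: R).reverse.filter (fun x => x.isSome)
      = Mf ++ some v :: P.reverse := by
    simp [List.reverse_append, List.filter_append, hfr, hfp, ← hMf]
  have hfillR : (P ++ none :: M ++ some v :: R).reverse.filter (fun x => x.isSome)
      = some v :: (Mf ++ P.reverse) := by
    simp [List.reverse_append, List.filter_append, hfr, hfp, ← hMf]
  have hMfLen : Mf.length = cM := by
    rw [hMf, hcM, List.filter_reverse, List.length_reverse, ← List.countP_eq_length_filter]
  have hgaps : (M.take cM).countP (fun x => x.isNone) ≤ Mf.length := by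
    calc (M.take cM).countP (fun x => x.isNone) ≤ (M.take cM).length := List.countP_le_length
    _ ≤ cM := by simp
    _ = Mf.length := hMfLen.symm
  have hcore : bFill (M.take cM) (Mf ++ some v :: P.reverse) = bFill (M.take cM) (Mf ++ P.reverse) :=
    bFill_congr _ _ _ _ hgaps
  have hlen : (P ++ some v :: M ++ none :: R).length = (P ++ none :: M ++ some v :: R).length := by
    simp
  simp only [simple_compact_alt, hkL, hkR, htakeL, htakeR, hfillL, hfillR, hlen]
  congr 1
  rw [bFill_append_some hP, bFill_append_some hP]
  simp only [bFill, List.headD_cons, List.tail_cons]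
  rw [hcore]

-- main loop lemma

-- getD at an in-range index is the element
theorem pv_getD_lt {l : List (Option Int)} {i : Nat} (h : i < l.length) : l.getD i none = l[i] := by
  simp [List.getD_eq_getElem?_getD, List.getElem?_eq_getElem h]

theorem pv_take_all_some {mem : List (Option Int)} {f : Nat}
    (h3 : ∀ i, i < f → mem.getD i none ≠ none) : ∀ y ∈ mem.take f, y.isSome := by
  intro y hy
  obtain ⟨i, hi, hyi⟩ := List.mem_iff_getElem.mp hy
  have hb : i < f ∧ i < mem.length := by simpa [List.length_take] using hi
  have := h3 i hb.1
  rw [pv_getD_lt hb.2] at this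
  rw [← hyi, List.getElem_take]
  exact Option.ne_none_iff_isSome.mp this

theorem pv_drop_all_none {mem : List (Option Int)} {t : Nat}
    (h4 : ∀ i, t < i → mem.getD i none = none) : ∀ y ∈ mem.drop (t + 1), y = none := by
  intro y hy
  obtain ⟨i, hi, hyi⟩ := List.mem_iff_getElem.mp hy
  have hin : t + 1 + i < mem.length := by simp [List.length_drop] at hi; omega
  have := h4 (t + 1 + i) (by omega)
  rw [pv_getD_lt hin] at this
  rw [← hyi, List.getElem_drop]
  exact this

theorem aMain_eq (fuel : Nat) : ∀ (mem : List (Option Int)) (f t : Nat),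
    pvInv mem f t → t - f < fuel → aMain mem f t fuel = simple_compact_alt mem := by
  induction fuel with
  | zero => intro mem f t _ h; omega
  | succ fuel ih =>
    intro mem f t hInv hfu
    obtain ⟨h1, h2, h3, h4, h5⟩ := hInv
    by_cases hft : f < t
    · -- one pass of the outer while
      obtain ⟨hfnone, htsome⟩ := h5 hft
      obtain ⟨v, hv⟩ : ∃ v, mem.getD t none = some v := by
        cases hmemt : mem.getD t none with
        | none => exact absurd hmemt htsome
        | some v => exact ⟨v, rfl⟩
      have hfn : f < mem.length := by omega
      set P := mem.take f with hP
      set M := (mem.drop (f + 1)).take (t - f - 1) with hM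
      set R := mem.drop (t + 1) with hR
      have hPlen : P.length = f := by simp [hP]; omega
      have hMlen : M.length = t - f - 1 := by simp [hM]; omega
      have hdec : mem = P ++ none :: (M ++ some v :: R) := by
        have e3 : mem[f] = none := by rw [← pv_getD_lt hfn]; exact hfnone
        have e5 : (mem.drop (f + 1)).drop (t - f - 1) = mem.drop t := by
          rw [List.drop_drop]; congr 1; omega
        have e7 : mem[t]'(by omega) = some v := by
          rw [← pv_getD_lt (show t < mem.length by omega)]; exact hv
        conv_lhs => rw [← List.take_append_drop f mem]
        rw [List.drop_eq_getElem_cons hfn, e3]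
        conv_lhs => rw [← List.take_append_drop (t - f - 1) (mem.drop (f + 1)), e5,
          List.drop_eq_getElem_cons (show t < mem.length by omega), e7]
      have hPsome : ∀ y ∈ P, y.isSome := pv_take_all_some h3
      have hRnone : ∀ y ∈ R, y = none := pv_drop_all_none h4
      have hlen2 : (P ++ some v :: M).length = t := by
        simp only [List.length_append, List.length_cons, hPlen, hMlen]; omega
      set mem1 := (mem.set f (mem.getD t none)).set t none with hmem1def
      have hmem1 : mem1 = P ++ some v :: (M ++ none :: R) := by
        rw [hmem1def, hv]
        conv_lhs => rw [hdec]
        rw [show (P ++ none :: (M ++ some v :: R)).set f (some v)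
              = P ++ some v :: (M ++ some v :: R) from hPlen ▸ pv_set_append_len P none (some v) _,
            show P ++ some v :: (M ++ some v :: R) = (P ++ some v :: M) ++ some v :: R by simp,
            show ((P ++ some v :: M) ++ some v :: R).set t none = (P ++ some v :: M) ++ none :: R from
              hlen2 ▸ pv_set_append_len (P ++ some v :: M) (some v) none R]
        simp
      have g1 : ∀ i, i < f → mem1.getD i none ≠ none := by
        intro i hi
        have hiP : i < P.length := by omega
        rw [hmem1, pv_getD_append_left hiP, pv_getD_lt hiP]
        exact Option.ne_none_iff_isSome.mpr (hPsome _ (List.getElem_mem hiP))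
      have g2 : mem1.getD f none = some v := by
        rw [hmem1, ← hPlen]
        exact pv_getD_append_len P (some v) _ none
      have g3 : ∀ i, t ≤ i → mem1.getD i none = none := by
        intro i hi
        rw [show mem1 = (P ++ some v :: M) ++ none :: R by rw [hmem1]; simp]
        exact pv_getD_tail_none hRnone (by omega)
      obtain ⟨hf1a, hf1b, hf1c, hf1d⟩ := aAdvF_spec mem1 f t (le_of_lt hft)
      set f1 := aAdvF mem1 f t with hf1def
      have hf1gt : f + 1 ≤ f1 := by
        rw [hf1def, aAdvF, dif_pos ⟨hft, by rw [g2]; simp⟩]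
        exact (aAdvF_spec mem1 (f + 1) t (by omega)).1
      obtain ⟨ht1a, ht1b, ht1c, ht1d⟩ := aAdvT_spec mem1 f1 t hf1b
      set t1 := aAdvT mem1 f1 t with ht1def
      have hlen1 : mem1.length = mem.length := by rw [hmem1def]; simp
      have hInv1 : pvInv mem1 f1 t1 := by
        refine ⟨ht1a, by omega, ?_, ?_, ?_⟩
        · intro i hi
          by_cases hif : i < f
          · exact g1 i hif
          · exact hf1c i (by omega) hi
        · intro i hi
          by_cases hit : i ≤ t
          · exact ht1c i hi hit
          · exact g3 i (by omega)
        · intro hf1t1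
          constructor
          · rcases hf1d with h | h
            · omega
            · exact h
          · rcases ht1d with h | h
            · omega
            · exact h
      have hstep : aMain mem f t (fuel + 1) = aMain mem1 f1 t1 fuel := by
        simp only [aMain, hft, if_true]
        rw [← hmem1def, ← hf1def, ← ht1def]
      rw [hstep, ih mem1 f1 t1 hInv1 (by omega), hmem1, hdec]
      have := alt_swap P M R v hPsome hRnone
      simpa only [List.append_assoc, List.cons_append] using this
    · -- loop exit: the list is already compact
      have hft' : f = t := by omega
      have hdec : mem = mem.take t ++ mem[t] :: mem.drop (t + 1) := by
        conv_lhs => rw [← List.take_append_drop t mem, List.drop_eq_getElem_cons h2]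
      have hPsome : ∀ y ∈ mem.take t, y.isSome := pv_take_all_some (hft' ▸ h3)
      have hRnone : ∀ y ∈ mem.drop (t + 1), y = none := pv_drop_all_none h4
      rw [show aMain mem f t (fuel + 1) = mem by simp [aMain, hft]]
      conv_lhs => rw [hdec]
      conv_rhs => rw [hdec]
      exact (alt_sorted _ _ _ hPsome hRnone).symm

theorem simple_compact_eq (memory : List (Option Int)) (h : Pre_simple_compact memory) :
    simple_compact memory = simple_compact_alt memory := by
  unfold simple_compact
  cases hidx : PySem.List.index? memory none with
  | none =>
    exact absurd h ((PySem.List.index?_eq_none_iff _ _).mp hidx)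
  | some f =>
    obtain ⟨pre, suf, hmem, hflen, hfnotin⟩ := (PySem.List.index?_eq_some_iff _ _ _).mp hidx
    have hfn : f < memory.length := by rw [hmem, ← hflen]; simp
    have hfle : f ≤ memory.length - 1 := by omega
    obtain ⟨ha, hb, hc, hd⟩ := aAdvT_spec memory f (memory.length - 1) hfle
    set t := aAdvT memory f (memory.length - 1) with htdef
    have hInv : pvInv memory f t := by
      refine ⟨ha, by omega, ?_, ?_, ?_⟩
      · intro i hi
        have hiP : i < pre.length := by omega
        rw [hmem, pv_getD_append_left hiP, pv_getD_lt hiP]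
        intro hcon
        exact hfnotin (hcon ▸ List.getElem_mem hiP)
      · intro i hi
        by_cases hin : i ≤ memory.length - 1
        · exact hc i hi hin
        · simp [List.getD_eq_getElem?_getD, List.getElem?_eq_none (show memory.length ≤ i by omega)]
      · intro hftlt
        constructor
        · rw [hmem, ← hflen]
          exact pv_getD_append_len pre none suf none
        · rcases hd with h' | h'
          · omega
          · exact h'
    exact aMain_eq (memory.length + 1) memory f t hInv (by omega)

theorem simple_compact_spec : Claim_equal_simple_compact := by
  intro memory _ hpre
  unfold Spec_simple_compact
  exact simple_compact_eq memory hpre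

@[simp]
theorem simple_compact_raises : Claim_raises_simple_compact := by
  unfold Claim_raises_simple_compact
  exact ⟨fun memory _ hr hp => hr hp, by decide⟩
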